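-- pv_equiv track=rewrite | github.com/namolert/comp-security | activity-1/create-rainbow-table.py | possible_word
-- ===== SOURCE A (Python) =====
-- def possible_word(word, full_word, i, len_word, lst):
--     if i == len_word:
--         lst.append(word)
--         return lst
--     if full_word[i] == 'o':
--         lst = possible_word(word + '0', full_word, i+1, len_word, lst)
--     elif full_word[i] == 'l' or full_word[i] == 'i':
--         lst = possible_word(word + '1', full_word, i+1, len_word, lst)
--     if full_word[i].islower():
--         lst = possible_word(
--             word + full_word[i].upper(), full_word, i+1, len_word, lst)
--     lst = possible_word(
--         word + full_word[i].lower(), full_word, i+1, len_word, lst)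
--     return lst
-- ===== SOURCE B (Python) =====
-- def possible_word(word, full_word, i, len_word, lst):
--     partials = [word]
--     for j in range(i, len_word):
--         ch = full_word[j]
--         choices = []
--         if ch == 'o':
--             choices.append('0')
--         elif ch == 'l' or ch == 'i':
--             choices.append('1')
--         if ch.islower():
--             choices.append(ch.upper())
--         choices.append(ch.lower())
--         partials = [p + c for p in partials for c in choices]
--     lst.extend(partials)
--     return lst
-- ===== Notes on version B (the rewrite author's own statement) =====
-- stated objective: alternative
-- what changed: Replaces the four-way self-recursion by an iterative breadth-first product: one pass over the character positions, each step extending every partial by that character's ordered choice list.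
import Mathlib
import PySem

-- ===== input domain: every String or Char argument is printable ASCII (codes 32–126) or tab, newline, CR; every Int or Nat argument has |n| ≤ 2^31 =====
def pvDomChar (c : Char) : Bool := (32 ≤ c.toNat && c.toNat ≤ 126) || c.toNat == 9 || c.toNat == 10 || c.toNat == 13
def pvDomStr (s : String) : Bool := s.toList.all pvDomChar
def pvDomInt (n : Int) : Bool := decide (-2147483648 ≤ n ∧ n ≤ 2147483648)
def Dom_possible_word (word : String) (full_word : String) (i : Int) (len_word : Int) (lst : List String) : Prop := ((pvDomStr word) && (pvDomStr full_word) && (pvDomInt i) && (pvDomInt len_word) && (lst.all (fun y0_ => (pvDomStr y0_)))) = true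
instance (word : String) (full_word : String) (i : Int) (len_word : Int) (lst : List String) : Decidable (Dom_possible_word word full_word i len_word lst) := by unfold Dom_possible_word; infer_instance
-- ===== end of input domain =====

-- B replaces A's four-way self-recursion by one iterative pass building the product of
-- per-character choice lists (objective: alternative decomposition, same cost).
-- Both Pythons mutate lst in place (append/extend) and return the same object; the
-- equivalence proved here is about the return value.

-- ===== PORT A =====
-- Literal transliteration of A's recursion; fuel = (len_word - i).toNat bounds the
-- recursion depth exactly on inputs where Python returns (it returns lst where Python raises).
def pwA_go (fw : List Char) (len_word : Int) : Nat → String → Int → List String → List String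
  | fuel, word, i, lst =>
    if i = len_word then lst ++ [word]
    else
      match fuel with
      | 0 => lst  -- unreachable inside Pre_; Python raises IndexError beyond here
      | Nat.succ fuel =>
        match PySem.List.pyGet? fw i with
        | none => lst  -- IndexError in Python; outside Pre_
        | some c =>
          let lst1 :=
            if c = 'o' then pwA_go fw len_word fuel (word ++ "0") (i+1) lst
            else if c = 'l' ∨ c = 'i' then pwA_go fw len_word fuel (word ++ "1") (i+1) lst
            else lst
          let lst2 :=
            if PySem.Chars.islower c then
              pwA_go fw len_word fuel (word ++ String.mk [PySem.Chars.upperChar c]) (i+1) lst1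
            else lst1
          pwA_go fw len_word fuel (word ++ String.mk [PySem.Chars.lowerChar c]) (i+1) lst2

def possible_word (word : String) (full_word : String) (i : Int) (len_word : Int) (lst : List String) : List String :=
  pwA_go full_word.toList len_word (len_word - i).toNat word i lst

-- ===== PORT B =====
-- the ordered choice list for one character (digit leet form, then uppercase, then lowercase)
def pwChoices (c : Char) : List String :=
  (if c = 'o' then ["0"] else if c = 'l' ∨ c = 'i' then ["1"] else [])
  ++ (if PySem.Chars.islower c then [String.mk [PySem.Chars.upperChar c]] else [])
  ++ [String.mk [PySem.Chars.lowerChar c]]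

-- one loop iteration: extend every partial by every choice for full_word[j]
def pwStep (fw : List Char) (ps : List String) (j : Int) : List String :=
  match PySem.List.pyGet? fw j with
  | none => ps  -- IndexError in Python; outside Pre_
  | some c => ps.flatMap (fun p => (pwChoices c).map (fun s => p ++ s))

def possible_word_alt (word : String) (full_word : String) (i : Int) (len_word : Int) (lst : List String) : List String :=
  lst ++ (PySem.List.pyRange i len_word 1).foldl (pwStep full_word.toList) [word]

-- ===== PRECONDITION & SPEC =====
-- Pre_ holds exactly where Python A returns: immediately (i = len_word) or with every
-- accessed index i..len_word-1 a valid Python index into full_word (negative wrap allowed).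
def Pre_possible_word (word : String) (full_word : String) (i : Int) (len_word : Int) (lst : List String) : Prop :=
  i = len_word ∨ (i < len_word ∧ len_word ≤ (full_word.toList.length : Int) ∧ -(full_word.toList.length : Int) ≤ i)
instance (word : String) (full_word : String) (i : Int) (len_word : Int) (lst : List String) : Decidable (Pre_possible_word word full_word i len_word lst) := by unfold Pre_possible_word; infer_instance

def pvWitness_possible_word : String × String × Int × Int × List String := ("", "ok", 0, 2, [])

def Spec_possible_word (word : String) (full_word : String) (i : Int) (len_word : Int) (lst : List String) (out : List String) : Prop := out = possible_word_alt word full_word i len_word lst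
instance (word : String) (full_word : String) (i : Int) (len_word : Int) (lst : List String) (out : List String) : Decidable (Spec_possible_word word full_word i len_word lst out) := by unfold Spec_possible_word; infer_instance

-- ===== CLAIM (what is proved, stated in full; the proofs are below) =====
def Claim_equal_possible_word : Prop := ∀ (word : String) (full_word : String) (i : Int) (len_word : Int) (lst : List String), Dom_possible_word word full_word i len_word lst → Pre_possible_word word full_word i len_word lst → Spec_possible_word word full_word i len_word lst (possible_word word full_word i len_word lst)


-- ===== LEMMAS AND PROOFS =====

-- pwStep distributes over appending of the partials state
theorem pwStep_append (fw : List Char) (ps qs : List String) (j : Int) :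
    pwStep fw (ps ++ qs) j = pwStep fw ps j ++ pwStep fw qs j := by
  unfold pwStep
  cases PySem.List.pyGet? fw j <;> simp

-- hence the whole foldl over the range does
theorem foldl_pwStep_append (fw : List Char) (r : List Int) (ps qs : List String) :
    r.foldl (pwStep fw) (ps ++ qs) = r.foldl (pwStep fw) ps ++ r.foldl (pwStep fw) qs := by
  induction r generalizing ps qs with
  | nil => simp
  | cons j r ih => simp [List.foldl_cons, pwStep_append, ih]

theorem foldl_pwStep_flatMap (fw : List Char) (r : List Int) (ws : List String) :
    r.foldl (pwStep fw) ws = ws.flatMap (fun w => r.foldl (pwStep fw) [w]) := by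
  induction ws with
  | nil =>
    induction r with
    | nil => simp
    | cons j r ih => simpa [List.foldl_cons, pwStep] using by cases h : PySem.List.pyGet? fw j <;> simp [pwStep, h, ih]
  | cons w ws ih =>
    have : (w :: ws) = [w] ++ ws := rfl
    rw [this, foldl_pwStep_append, ih]
    simp

-- main invariant: with exactly enough fuel and every index valid, A's recursion
-- equals lst ++ B's iterative product
theorem pwA_go_eq (fw : List Char) (len_word : Int) :
    ∀ (fuel : Nat) (word : String) (i : Int) (lst : List String),
      i + fuel = len_word →
      (∀ j : Int, i ≤ j → j < len_word → (PySem.List.pyGet? fw j).isSome) →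
      pwA_go fw len_word fuel word i lst
        = lst ++ (PySem.List.pyRange i len_word 1).foldl (pwStep fw) [word] := by
  intro fuel
  induction fuel with
  | zero =>
    intro word i lst hfe _
    have hi : i = len_word := by omega
    rw [pwA_go]
    simp [hi, PySem.List.pyRange_one_eq_nil (le_refl len_word)]
  | succ fuel ih =>
    intro word i lst hfe hvalid
    have hilt : i < len_word := by omega
    have hne : i ≠ len_word := by omega
    obtain ⟨c, hc⟩ : ∃ c, PySem.List.pyGet? fw i = some c := by
      have := hvalid i (le_refl i) hilt
      cases h : PySem.List.pyGet? fw i with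
      | none => rw [h] at this; simp at this
      | some c => exact ⟨c, rfl⟩
    have hvalid' : ∀ j : Int, i + 1 ≤ j → j < len_word → (PySem.List.pyGet? fw j).isSome := by
      intro j h1 h2; exact hvalid j (by omega) h2
    have ihw : ∀ (w : String) (l : List String),
        pwA_go fw len_word fuel w (i+1) l
          = l ++ (PySem.List.pyRange (i+1) len_word 1).foldl (pwStep fw) [w] := by
      intro w l; exact ih w (i+1) l (by omega) hvalid'
    -- B side: peel the first index off the range
    rw [pwA_go]
    simp only [hne, if_false, hc]
    rw [PySem.List.pyRange_one_cons hilt, List.foldl_cons]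
    have hstep : pwStep fw [word] i = (pwChoices c).map (fun s => word ++ s) := by
      simp [pwStep, hc]
    rw [hstep, foldl_pwStep_flatMap]
    -- A side: resolve the three sequential updates into the choice list
    simp only [pwChoices, List.map_append, List.flatMap_append, ihw]
    split_ifs <;> simp [List.append_assoc]

-- ===== VERDICT (by name: the statement is the Claim_ definition above) =====
theorem possible_word_spec : Claim_equal_possible_word := by
  intro word full_word i len_word lst _ hpre
  unfold Spec_possible_word possible_word possible_word_alt
  rcases hpre with heq | ⟨hlt, hle, hneg⟩
  · subst heq
    rw [pwA_go.eq_def]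
    simp [PySem.List.pyRange_one_eq_nil (le_refl i)]
  · apply pwA_go_eq
    · omega
    · intro j h1 h2
      cases h : PySem.List.pyGet? full_word.toList j with
      | none =>
        have := (PySem.List.pyGet?_eq_none_iff (xs := full_word.toList) (i := j)).mp h
        simp only [PySem.Raise.InRange] at this
        omega
      | some _ => simp
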